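-- pv_equiv track=rewrite | github.com/zenicc/projecteuler | euler113.py | numBouncy
-- ===== SOURCE A (Python) =====
-- def numBouncy(n):
--     # returns true if n is bouncy, false if not
--     up = False
--     down = False
--
--     numList = [int(x) for x in str(n)]
--
--     for a in range(1, len(numList)):
--         if numList[a] > numList[a-1]:
--             up = True
--         if numList[a] < numList[a-1]:
--             down = True
--         if up and down:
--             return True
--
--     return False
-- ===== SOURCE B (Python) =====
-- def numBouncy(n):
--     # returns true if n is bouncy, false if not
--     numList = [int(x) for x in str(n)]
--     return numList != sorted(numList) and numList != sorted(numList, reverse=True)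
-- ===== Notes on version B (the rewrite author's own statement) =====
-- stated objective: simpler
-- what changed: Replaces the stateful adjacent-pair scan with up/down flags and early return by two sort-and-compare checks: bouncy iff the digit list differs from both its ascending and descending sorted forms.
import Mathlib
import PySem

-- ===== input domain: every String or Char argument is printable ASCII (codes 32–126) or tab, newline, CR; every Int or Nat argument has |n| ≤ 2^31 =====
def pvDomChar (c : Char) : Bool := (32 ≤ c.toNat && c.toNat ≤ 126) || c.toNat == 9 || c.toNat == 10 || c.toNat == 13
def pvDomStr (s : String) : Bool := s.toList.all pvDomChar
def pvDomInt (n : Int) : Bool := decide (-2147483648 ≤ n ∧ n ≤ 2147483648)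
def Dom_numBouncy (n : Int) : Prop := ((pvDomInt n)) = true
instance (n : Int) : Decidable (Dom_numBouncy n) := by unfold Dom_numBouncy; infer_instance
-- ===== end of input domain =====

-- B decides bounciness by comparing the digit list with its two sorted forms instead of
-- A's stateful adjacent-pair scan; objective: simpler. A raises ValueError on negative n
-- (int('-')), and B raises identically there, so Pre_ restricts to 0 ≤ n.


-- ===== PORT A =====
-- the for-loop over range(1, len(numList)) with the up/down flags and the early return
def nbGo : Int → List Int → Bool → Bool → Bool
  | _, [], _, _ => false
  | prev, a :: rest, up, down =>
    let up' := if a > prev then true else up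
    let down' := if a < prev then true else down
    if up' && down' then true else nbGo a rest up' down'

def numBouncy (n : Int) : Bool :=
  -- numList = [int(x) for x in str(n)]; int(single char) is exact on Pre_ (digit chars)
  let numList : List Int := (PySem.Int.toChars n).map (fun c => (PySem.Int.ofChars? [c]).getD 0)
  match numList with
  | [] => false
  | h :: t => nbGo h t false false

-- ===== PORT B =====
def numBouncy_alt (n : Int) : Bool :=
  let numList : List Int := (PySem.Int.toChars n).map (fun c => (PySem.Int.ofChars? [c]).getD 0)
  decide (numList ≠ PySem.List.sorted numList (fun x => x) false) &&
  decide (numList ≠ PySem.List.sorted numList (fun x => x) true)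

-- ===== PRECONDITION & SPEC =====
-- Pre_ excludes negative n, on which both Pythons raise ValueError (int('-')).
def Pre_numBouncy (n : Int) : Prop := 0 ≤ n
instance (n : Int) : Decidable (Pre_numBouncy n) := by unfold Pre_numBouncy; infer_instance
def pvWitness_numBouncy : Int := (155)

def Spec_numBouncy (n : Int) (out : Bool) : Prop := out = numBouncy_alt n
instance (n : Int) (out : Bool) : Decidable (Spec_numBouncy n out) := by unfold Spec_numBouncy; infer_instance

-- ===== CLAIM (what is proved, stated in full; the proofs are below) =====
def Claim_equal_numBouncy : Prop := ∀ (n : Int), Dom_numBouncy n → Pre_numBouncy n → Spec_numBouncy n (numBouncy n)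

-- ===== LEMMAS AND PROOFS =====

-- "some later adjacent digit is larger / smaller than its predecessor" along prev :: rest
def hasInc : Int → List Int → Bool
  | _, [] => false
  | p, a :: t => (decide (p < a)) || hasInc a t

def hasDec : Int → List Int → Bool
  | _, [] => false
  | p, a :: t => (decide (a < p)) || hasDec a t

theorem nbGo_eq (rest : List Int) : ∀ (prev : Int) (up down : Bool), ¬(up = true ∧ down = true) →
    nbGo prev rest up down = ((up || hasInc prev rest) && (down || hasDec prev rest)) := by
  induction rest with
  | nil =>
    intro prev up down h
    cases up <;> cases down <;> simp_all [nbGo, hasInc, hasDec]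
  | cons a t ih =>
    intro prev up down h
    have i1 := ih a false false (by simp)
    have i2 := ih a true false (by simp)
    have i3 := ih a false true (by simp)
    by_cases c1 : a > prev <;> by_cases c2 : a < prev <;>
      cases up <;> cases down <;>
      simp_all [nbGo, hasInc, hasDec]
    all_goals
      have h1 : ¬ prev < a := by omega
      have h2 : ¬ a < prev := by omega
      simp [h1, h2]
      exact ((ih a).1).1

theorem hasDec_false_iff (t : List Int) : ∀ h : Int, hasDec h t = false ↔ List.IsChain (· ≤ ·) (h :: t) := by
  induction t with
  | nil => intro h; simp [hasDec]
  | cons a s ih =>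
    intro h
    simp only [hasDec, Bool.or_eq_false_iff, decide_eq_false_iff_not, not_lt,
      List.isChain_cons_cons, ih a]

theorem hasInc_false_iff (t : List Int) : ∀ h : Int, hasInc h t = false ↔ List.IsChain (fun a b => b ≤ a) (h :: t) := by
  induction t with
  | nil => intro h; simp [hasInc]
  | cons a s ih =>
    intro h
    simp only [hasInc, Bool.or_eq_false_iff, decide_eq_false_iff_not, not_lt,
      List.isChain_cons_cons, ih a]

theorem ne_sorted_eq_hasDec (h : Int) (t : List Int) :
    decide ((h :: t) ≠ PySem.List.sorted (h :: t) (fun x => x) false) = hasDec h t := by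
  by_cases hd : hasDec h t = true
  · rw [hd, decide_eq_true_iff]
    intro heq
    have hp : (h :: t).Pairwise (fun a b : Int => a ≤ b) := by
      have := PySem.List.sorted_pairwise (h :: t) (fun x : Int => x); rw [← heq] at this; exact this
    have hc : List.IsChain (fun a b : Int => a ≤ b) (h :: t) := (List.isChain_iff_pairwise).mpr hp
    rw [(hasDec_false_iff t h).mpr hc] at hd
    exact Bool.false_ne_true hd
  · have hd' : hasDec h t = false := by revert hd; cases hasDec h t <;> simp
    have hc := (hasDec_false_iff t h).mp hd'
    have hp : (h :: t).Pairwise (fun a b : Int => a ≤ b) := (List.isChain_iff_pairwise).mp hc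
    rw [hd', decide_eq_false_iff_not]
    simp [PySem.List.sorted_eq_self_of_pairwise _ _ hp]

theorem ne_sorted_rev_eq_hasInc (h : Int) (t : List Int) :
    decide ((h :: t) ≠ PySem.List.sorted (h :: t) (fun x => x) true) = hasInc h t := by
  by_cases hi : hasInc h t = true
  · rw [hi, decide_eq_true_iff]
    intro heq
    have hp : (h :: t).Pairwise (fun a b : Int => b ≤ a) := by
      have := PySem.List.sorted_pairwise_rev (h :: t) (fun x : Int => x); rw [← heq] at this; exact this
    have hc : List.IsChain (fun a b : Int => b ≤ a) (h :: t) := (List.isChain_iff_pairwise).mpr hp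
    rw [(hasInc_false_iff t h).mpr hc] at hi
    exact Bool.false_ne_true hi
  · have hi' : hasInc h t = false := by revert hi; cases hasInc h t <;> simp
    have hc := (hasInc_false_iff t h).mp hi'
    have hp : (h :: t).Pairwise (fun a b : Int => b ≤ a) := (List.isChain_iff_pairwise).mp hc
    rw [hi', decide_eq_false_iff_not]
    simp [PySem.List.sorted_rev_eq_self_of_pairwise _ _ hp]

theorem core_eq (l : List Int) :
    (match l with
     | [] => false
     | h :: t => nbGo h t false false) =
    (decide (l ≠ PySem.List.sorted l (fun x => x) false) &&
     decide (l ≠ PySem.List.sorted l (fun x => x) true)) := by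
  cases l with
  | nil => simp [PySem.List.sorted]
  | cons h t =>
    show nbGo h t false false = _
    rw [nbGo_eq t h false false (by simp), ne_sorted_eq_hasDec, ne_sorted_rev_eq_hasInc]
    simp [Bool.and_comm]

-- ===== VERDICT (by name: the statement is the Claim_ definition above) =====
theorem numBouncy_spec : Claim_equal_numBouncy := by
  intro n _ _
  unfold Spec_numBouncy numBouncy numBouncy_alt
  exact core_eq _
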